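-- pv_equiv track=rewrite | github.com/spaceliberdade2023/space-liberdade | outputs/_atualizar_paginas.py | limpar_links
-- ===== SOURCE A (Python) =====
-- def limpar_links(html):
--     # Substitui href="X.html" por href="/X" para as páginas conhecidas
--     paginas_links = ['index', 'politica', 'economia', 'tecnologia',
--                      'esportes', 'cultura', 'noticia-1', 'noticia-2',
--                      'noticia-3', 'noticia-4', 'noticia-5']
--     for p in paginas_links:
--         rota = '/' if p == 'index' else f'/{p}'
--         html = html.replace(f'href="{p}.html"', f'href="{rota}"')
--     return html
-- ===== SOURCE B (Python) =====
-- def limpar_links(html):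
--     # One left-to-right pass over the string, replacing every known
--     # href="X.html" via a precomputed pattern->replacement table,
--     # instead of 11 sequential full-string replace passes.
--     paginas_links = ['index', 'politica', 'economia', 'tecnologia',
--                      'esportes', 'cultura', 'noticia-1', 'noticia-2',
--                      'noticia-3', 'noticia-4', 'noticia-5']
--     table = [('href="%s.html"' % p,
--               'href="%s"' % ('/' if p == 'index' else '/' + p))
--              for p in paginas_links]
--     out = []
--     i = 0
--     n = len(html)
--     while i < n:
--         for pat, rep in table:
--             if html.startswith(pat, i):
--                 out.append(rep)
--                 i += len(pat)
--                 break
--         else: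
--             out.append(html[i])
--             i += 1
--     return ''.join(out)
-- ===== Notes on version B (the rewrite author's own statement) =====
-- stated objective: alternative
-- what changed: Replaces the 11 sequential full-string str.replace passes by a single left-to-right scan that consults a precomputed pattern->replacement table at each position.
import Mathlib
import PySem

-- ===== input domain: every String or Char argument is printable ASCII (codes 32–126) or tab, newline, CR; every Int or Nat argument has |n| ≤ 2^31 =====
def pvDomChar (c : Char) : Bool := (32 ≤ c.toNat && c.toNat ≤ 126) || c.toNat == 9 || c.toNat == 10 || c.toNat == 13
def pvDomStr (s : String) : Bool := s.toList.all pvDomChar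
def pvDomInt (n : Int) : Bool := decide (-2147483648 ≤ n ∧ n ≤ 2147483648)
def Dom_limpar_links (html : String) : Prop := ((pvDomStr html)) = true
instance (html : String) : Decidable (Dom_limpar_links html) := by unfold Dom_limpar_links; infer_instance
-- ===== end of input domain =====

-- B replaces A's 11 sequential full-string replace passes by one left-to-right
-- scan consulting a precomputed pattern→replacement table (objective: alternative).

-- ===== PORT A =====
def limpar_links (html : String) : String :=
  let paginas_links : List String :=
    ["index", "politica", "economia", "tecnologia",
     "esportes", "cultura", "noticia-1", "noticia-2",
     "noticia-3", "noticia-4", "noticia-5"]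
  paginas_links.foldl (fun h p =>
    let rota : String := if p = "index" then "/" else "/" ++ p
    PySem.Str.replace h ("href=\"" ++ p ++ ".html\"") ("href=\"" ++ rota ++ "\"")) html

-- ===== PORT B =====
-- Source B's table: [(f'href="{p}.html"', f'href="{rota}"') for p in paginas_links]
def pvTable : List (List Char × List Char) :=
  (["index", "politica", "economia", "tecnologia",
    "esportes", "cultura", "noticia-1", "noticia-2",
    "noticia-3", "noticia-4", "noticia-5"] : List String).map (fun p =>
    (("href=\"" ++ p ++ ".html\"").toList,
     ("href=\"" ++ (if p = "index" then "/" else "/" ++ p) ++ "\"").toList))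

-- Source B's inner `for pat, rep in table: if html.startswith(pat, i)` loop:
-- first table entry whose pattern matches at the current position
-- (the !isEmpty test is only a totality guard for pvScan; all patterns are nonempty).
def pvFindPat : List (List Char × List Char) → List Char → Option (List Char × List Char)
  | [], _ => none
  | (pat, rep) :: T, l =>
    if pat.isPrefixOf l && !pat.isEmpty then some (pat, rep) else pvFindPat T l

-- termination fact for pvScan (the port cites it in decreasing_by)
theorem pvFindPat_some {T : List (List Char × List Char)} {l pat rep : List Char}
    (h : pvFindPat T l = some (pat, rep)) :
    (pat, rep) ∈ T ∧ pat <+: l ∧ pat ≠ [] := by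
  induction T with
  | nil => simp [pvFindPat] at h
  | cons hd tl ih =>
    obtain ⟨p, r⟩ := hd
    simp only [pvFindPat] at h
    split at h
    · rename_i hc
      simp only [Bool.and_eq_true, Bool.not_eq_true', List.isEmpty_eq_false_iff] at hc
      obtain ⟨rfl, rfl⟩ : p = pat ∧ r = rep := by
        have := Option.some.inj h
        exact ⟨congrArg Prod.fst this, congrArg Prod.snd this⟩
      exact ⟨List.mem_cons_self, List.isPrefixOf_iff_prefix.mp hc.1, hc.2⟩
    · obtain ⟨hm, h1, h2⟩ := ih h
      exact ⟨List.mem_cons_of_mem _ hm, h1, h2⟩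

-- Source B's outer while-loop over the string, as structural recursion on the chars
def pvScan (T : List (List Char × List Char)) : List Char → List Char
  | [] => []
  | c :: t =>
    match h : pvFindPat T (c :: t) with
    | some (pat, rep) => rep ++ pvScan T ((c :: t).drop pat.length)
    | none => c :: pvScan T t
  termination_by l => l.length
  decreasing_by
    · obtain ⟨-, hpre, hne⟩ := pvFindPat_some h
      have h1 : 0 < pat.length := List.length_pos_iff.mpr hne
      have h2 : pat.length ≤ (c :: t).length := hpre.length_le
      simp only [List.length_drop]
      simp only [List.length_cons] at h2 ⊢
      omega
    · simp

def limpar_links_alt (html : String) : String :=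
  String.ofList (pvScan pvTable html.toList)

-- ===== PRECONDITION & SPEC =====
def Spec_limpar_links (html : String) (out : String) : Prop := out = limpar_links_alt html
instance (html : String) (out : String) : Decidable (Spec_limpar_links html out) := by unfold Spec_limpar_links; infer_instance

-- ===== CLAIM (what is proved, stated in full; the proofs are below) =====
def Claim_equal_limpar_links : Prop := ∀ (html : String), Dom_limpar_links html → Spec_limpar_links html (limpar_links html)

-- ===== LEMMAS AND PROOFS =====

-- single-pattern leftmost non-overlapping scan (what one str.replace pass computes)
def pvRep1 (old new : List Char) : List Char → List Char
  | [] => []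
  | c :: t =>
    if h : (old.isPrefixOf (c :: t) && !old.isEmpty) = true
    then new ++ pvRep1 old new ((c :: t).drop old.length)
    else c :: pvRep1 old new t
  termination_by l => l.length
  decreasing_by
    · simp only [Bool.and_eq_true, Bool.not_eq_true', List.isEmpty_eq_false_iff] at h
      have h1 : 0 < old.length := List.length_pos_iff.mpr h.2
      have h2 : old.length ≤ (c :: t).length :=
        (List.isPrefixOf_iff_prefix.mp h.1).length_le
      simp only [List.length_drop]
      simp only [List.length_cons] at h2 ⊢
      omega
    · simp

theorem pvGo_eq (old new : List Char) (hne : old ≠ []) :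
    ∀ (fuel : Nat) (l acc : List Char), l.length ≤ fuel →
      PySem.Chars.replace.go old new fuel l acc = acc.reverse ++ pvRep1 old new l := by
  intro fuel
  induction fuel with
  | zero =>
    intro l acc hl
    have : l = [] := List.eq_nil_of_length_eq_zero (Nat.le_zero.mp hl)
    subst this
    simp [PySem.Chars.replace.go, pvRep1]
  | succ n ih =>
    intro l acc hl
    cases l with
    | nil => simp [PySem.Chars.replace.go, pvRep1]
    | cons c t =>
      rw [PySem.Chars.replace.go]
      by_cases hp : old.isPrefixOf (c :: t) = true
      · rw [if_pos hp]
        have hlen : ((c :: t).drop old.length).length ≤ n := by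
          have h1 : 0 < old.length := List.length_pos_iff.mpr hne
          simp only [List.length_drop, List.length_cons]
          simp only [List.length_cons] at hl
          omega
        rw [ih _ _ hlen, pvRep1, dif_pos (by simp [hp, hne])]
        simp
      · rw [if_neg hp]
        rw [ih _ _ (by simpa using Nat.le_of_succ_le_succ (by simpa using hl))]
        rw [pvRep1, dif_neg (by simp [hp])]
        simp

theorem pvReplace_eq (old new s : List Char) (hne : old ≠ []) :
    PySem.Chars.replace s old new = pvRep1 old new s := by
  rw [PySem.Chars.replace, if_neg (by simp [hne])]
  simpa using pvGo_eq old new hne s.length s [] le_rfl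

-- A's chain of replace passes, applied left to right over the table
def pvChain : List (List Char × List Char) → List Char → List Char
  | [], l => l
  | (o, n) :: T, l => pvChain T (pvRep1 o n l)

theorem pvPref_split {p s m : List Char} (h : p <+: s ++ m) : p <+: s ∨ s <+: p :=
  List.prefix_or_prefix_of_prefix h (s.prefix_append m)

-- side conditions making one extra replace pass commute with a table scan
def pvOK (T : List (List Char × List Char)) (q : List Char) : Prop :=
  ∀ pr ∈ T,
    (∀ s ∈ pr.2.tails, s ≠ [] → ¬ q <+: s ∧ ¬ s <+: q) ∧
    (∀ s ∈ q.tails, s ≠ [] → ¬ pr.1 <+: s ∧ ¬ s <+: pr.1) ∧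
    (∀ v ∈ q.tails, v ≠ [] → ¬ v <+: pr.2 ∧ ¬ pr.2 <+: v)

theorem pvRep1_append (q r : List Char) :
    ∀ (x m : List Char), (∀ s ∈ x.tails, s ≠ [] → ¬ q <+: s ∧ ¬ s <+: q) →
      pvRep1 q r (x ++ m) = x ++ pvRep1 q r m := by
  intro x
  induction x with
  | nil => intro m _; simp
  | cons a u ih =>
    intro m h
    have hself := h (a :: u) ((List.mem_tails _ _).mpr List.suffix_rfl) (List.cons_ne_nil a u)
    rw [List.cons_append, pvRep1, dif_neg ?_]
    · rw [ih m (fun s hs hne =>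
        h s ((List.mem_tails _ _).mpr (((List.mem_tails _ _).mp hs).trans (List.suffix_cons a u))) hne)]
      simp
    · simp only [Bool.and_eq_true, List.isPrefixOf_iff_prefix, not_and]
      intro hpre
      rw [← List.cons_append] at hpre
      rcases pvPref_split hpre with h1 | h1
      · exact absurd h1 hself.1
      · exact absurd h1 hself.2

theorem pvFindPat_none {T : List (List Char × List Char)} {l : List Char}
    (h : ∀ pr ∈ T, ¬ pr.1 <+: l) : pvFindPat T l = none := by
  induction T with
  | nil => rfl
  | cons hd tl ih =>
    obtain ⟨p, r⟩ := hd
    rw [pvFindPat, if_neg (by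
      simp only [Bool.and_eq_true, List.isPrefixOf_iff_prefix]
      exact fun hc => h (p, r) List.mem_cons_self hc.1)]
    exact ih fun pr hm => h pr (List.mem_cons_of_mem _ hm)

theorem pvScan_some {T : List (List Char × List Char)} {l pat rep : List Char}
    (h : pvFindPat T l = some (pat, rep)) :
    pvScan T l = rep ++ pvScan T (l.drop pat.length) := by
  cases l with
  | nil =>
    obtain ⟨-, hpre, hne⟩ := pvFindPat_some h
    exact absurd (List.prefix_nil.mp hpre) hne
  | cons c t =>
    rw [pvScan]
    split
    · rename_i pat' rep' h'
      rw [h'] at h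
      have := Option.some.inj h
      obtain rfl : pat' = pat := congrArg Prod.fst this
      obtain rfl : rep' = rep := congrArg Prod.snd this
      rfl
    · rename_i h'
      rw [h'] at h; exact absurd h (by simp)

theorem pvScan_none {T : List (List Char × List Char)} {c : Char} {t : List Char}
    (h : pvFindPat T (c :: t) = none) :
    pvScan T (c :: t) = c :: pvScan T t := by
  rw [pvScan]
  split
  · rename_i pat' rep' h'
    rw [h'] at h; exact absurd h (by simp)
  · rfl

theorem pvScan_append (T : List (List Char × List Char)) :
    ∀ (x m : List Char), (∀ pr ∈ T, ∀ s ∈ x.tails, s ≠ [] → ¬ pr.1 <+: s ∧ ¬ s <+: pr.1) →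
      pvScan T (x ++ m) = x ++ pvScan T m := by
  intro x
  induction x with
  | nil => intro m _; simp
  | cons a u ih =>
    intro m h
    have hnone : pvFindPat T (a :: (u ++ m)) = none := by
      apply pvFindPat_none
      intro pr hm hpre
      rw [← List.cons_append] at hpre
      have hself := h pr hm (a :: u) ((List.mem_tails _ _).mpr List.suffix_rfl) (List.cons_ne_nil a u)
      rcases pvPref_split hpre with h1 | h1
      · exact absurd h1 hself.1
      · exact absurd h1 hself.2
    rw [List.cons_append, pvScan_none hnone]
    rw [ih m (fun pr hm s hs hne =>
      h pr hm s ((List.mem_tails _ _).mpr (((List.mem_tails _ _).mp hs).trans (List.suffix_cons a u))) hne)]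
    simp

theorem pvSafe (T : List (List Char × List Char)) (q : List Char)
    (hS : ∀ pr ∈ T, ∀ v ∈ q.tails, v ≠ [] → ¬ v <+: pr.2 ∧ ¬ pr.2 <+: v) :
    ∀ (n : Nat) (t : List Char), t.length ≤ n → ∀ v ∈ q.tails, v ≠ [] →
      v <+: pvScan T t → v <+: t := by
  intro n
  induction n with
  | zero =>
    intro t ht v _ hvne hvp
    obtain rfl : t = [] := List.eq_nil_of_length_eq_zero (Nat.le_zero.mp ht)
    rw [pvScan] at hvp
    exact absurd (List.prefix_nil.mp hvp) hvne
  | succ n ih =>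
    intro t ht v hv hvne hvp
    cases t with
    | nil =>
      rw [pvScan] at hvp
      exact absurd (List.prefix_nil.mp hvp) hvne
    | cons c t' =>
      cases hf : pvFindPat T (c :: t') with
      | some x =>
        obtain ⟨pat, rep⟩ := x
        obtain ⟨hmem, -, -⟩ := pvFindPat_some hf
        rw [pvScan_some hf] at hvp
        rcases pvPref_split hvp with h1 | h1
        · exact absurd h1 (hS _ hmem v hv hvne).1
        · exact absurd h1 (hS _ hmem v hv hvne).2
      | none =>
        rw [pvScan_none hf] at hvp
        cases v with
        | nil => exact absurd rfl hvne
        | cons v0 v' =>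
          obtain ⟨rfl, hv'⟩ := List.cons_prefix_cons.mp hvp
          rcases eq_or_ne v' [] with rfl | hne2
          · exact List.cons_prefix_cons.mpr ⟨rfl, List.nil_prefix⟩
          · have hv'tails : v' ∈ q.tails := (List.mem_tails _ _).mpr
              (((List.suffix_cons v0 v').trans ((List.mem_tails _ _).mp hv)))
            have := ih t' (by simpa using Nat.le_of_succ_le_succ (by simpa using ht))
              v' hv'tails hne2 hv'
            exact List.cons_prefix_cons.mpr ⟨rfl, this⟩

theorem pvFindPat_append_some {T : List (List Char × List Char)} {l : List Char}
    {x : List Char × List Char} (T₂ : List (List Char × List Char))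
    (h : pvFindPat T l = some x) : pvFindPat (T ++ T₂) l = some x := by
  induction T with
  | nil => simp [pvFindPat] at h
  | cons hd tl ih =>
    obtain ⟨p, r⟩ := hd
    rw [pvFindPat] at h
    rw [List.cons_append, pvFindPat]
    split at h
    · rename_i hc; rw [if_pos hc]; exact h
    · rename_i hc; rw [if_neg hc]; exact ih h

theorem pvFindPat_append_none {T : List (List Char × List Char)} {l q r : List Char}
    (h : pvFindPat T l = none) :
    pvFindPat (T ++ [(q, r)]) l =
      if q.isPrefixOf l && !q.isEmpty then some (q, r) else none := by
  induction T with
  | nil => rfl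
  | cons hd tl ih =>
    obtain ⟨p, r'⟩ := hd
    rw [pvFindPat] at h
    rw [List.cons_append, pvFindPat]
    split at h
    · exact absurd h (by simp)
    · rename_i hc; rw [if_neg hc]; exact ih h

theorem pvScan_nil : ∀ l, pvScan [] l = l := by
  intro l
  induction l with
  | nil => rw [pvScan]
  | cons c t ih => rw [pvScan_none rfl, ih]

theorem pvRep1_head_match (q r l : List Char) (hq : q ≠ []) (hpre : q <+: l) :
    pvRep1 q r l = r ++ pvRep1 q r (l.drop q.length) := by
  cases l with
  | nil => exact absurd (List.prefix_nil.mp hpre) hq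
  | cons c t =>
    rw [pvRep1, dif_pos]
    simp only [Bool.and_eq_true, List.isPrefixOf_iff_prefix,
      Bool.not_eq_true', List.isEmpty_eq_false_iff]
    exact ⟨hpre, hq⟩

theorem pvStep (T : List (List Char × List Char)) (q r : List Char)
    (hq : q ≠ []) (hOK : pvOK T q) :
    ∀ (n : Nat) (l : List Char), l.length ≤ n →
      pvRep1 q r (pvScan T l) = pvScan (T ++ [(q, r)]) l := by
  intro n
  induction n with
  | zero =>
    intro l hl
    obtain rfl : l = [] := List.eq_nil_of_length_eq_zero (Nat.le_zero.mp hl)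
    rw [pvScan, pvScan, pvRep1]
  | succ n ih =>
    intro l hl
    cases l with
    | nil => rw [pvScan, pvScan, pvRep1]
    | cons c t =>
      cases hf : pvFindPat T (c :: t) with
      | some x =>
        obtain ⟨pat, rep⟩ := x
        obtain ⟨hmem, hpre, hpne⟩ := pvFindPat_some hf
        rw [pvScan_some hf]
        rw [pvRep1_append q r rep _ (fun s hs hne => (hOK _ hmem).1 s hs hne)]
        have hlen : ((c :: t).drop pat.length).length ≤ n := by
          have h1 : 0 < pat.length := List.length_pos_iff.mpr hpne
          simp only [List.length_drop, List.length_cons]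
          simp only [List.length_cons] at hl
          omega
        rw [ih _ hlen]
        rw [pvScan_some (pvFindPat_append_some [(q, r)] hf)]
      | none =>
        by_cases hqp : q <+: c :: t
        · obtain ⟨m, hm⟩ := hqp
          rw [← hm]
          rw [pvScan_append T q m (fun pr hmem s hs hne => (hOK _ hmem).2.1 s hs hne)]
          rw [pvRep1_head_match q r _ hq (q.prefix_append _), List.drop_left]
          have hmlen : m.length ≤ n := by
            have h1 : 0 < q.length := List.length_pos_iff.mpr hq
            have : (q ++ m).length = (c :: t).length := by rw [hm]
            simp only [List.length_append, List.length_cons] at this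
            simp only [List.length_cons] at hl
            omega
          rw [ih _ hmlen]
          have hfind : pvFindPat (T ++ [(q, r)]) (q ++ m) = some (q, r) := by
            rw [hm, pvFindPat_append_none hf, if_pos]
            simp only [Bool.and_eq_true, List.isPrefixOf_iff_prefix,
              Bool.not_eq_true', List.isEmpty_eq_false_iff]
            exact ⟨hm ▸ q.prefix_append m, hq⟩
          rw [pvScan_some ((by rw [hm] at hfind ⊢; exact hfind) : pvFindPat (T ++ [(q, r)]) (q ++ m) = some (q, r)), List.drop_left]
        · rw [pvScan_none hf]
          have hnomatch : ¬ q <+: c :: pvScan T t := by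
            intro hcon
            cases q with
            | nil => exact hq rfl
            | cons q0 w =>
              obtain ⟨rfl, hw⟩ := List.cons_prefix_cons.mp hcon
              rcases eq_or_ne w [] with rfl | hwne
              · exact hqp (List.cons_prefix_cons.mpr ⟨rfl, List.nil_prefix⟩)
              · have hwt : w ∈ (q0 :: w).tails := (List.mem_tails _ _).mpr (List.suffix_cons q0 w)
                have := pvSafe T (q0 :: w) (fun pr hm v hv hne => (hOK _ hm).2.2 v hv hne)
                  t.length t le_rfl w hwt hwne hw
                exact hqp (List.cons_prefix_cons.mpr ⟨rfl, this⟩)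
          rw [pvRep1, dif_neg (by
            simp only [Bool.and_eq_true, List.isPrefixOf_iff_prefix, not_and]
            exact fun hc => absurd hc hnomatch)]
          rw [ih t (by simpa using Nat.le_of_succ_le_succ (by simpa using hl))]
          have hfind' : pvFindPat (T ++ [(q, r)]) (c :: t) = none := by
            rw [pvFindPat_append_none hf, if_neg]
            simp only [Bool.and_eq_true, List.isPrefixOf_iff_prefix, not_and]
            exact fun hc => absurd hc hqp
          rw [pvScan_none hfind']

def pvGood : List (List Char × List Char) → List (List Char × List Char) → Prop
  | _, [] => True
  | T₁, (q, r) :: T₂ => q ≠ [] ∧ pvOK T₁ q ∧ pvGood (T₁ ++ [(q, r)]) T₂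

theorem pvChain_eq_scan (l : List Char) :
    ∀ (T₂ T₁ : List (List Char × List Char)), pvGood T₁ T₂ →
      pvChain T₂ (pvScan T₁ l) = pvScan (T₁ ++ T₂) l := by
  intro T₂
  induction T₂ with
  | nil => intro T₁ _; simp [pvChain]
  | cons hd T₂' ih =>
    obtain ⟨q, r⟩ := hd
    intro T₁ hg
    obtain ⟨hq, hOK, hg'⟩ := hg
    rw [pvChain]
    rw [pvStep T₁ q r hq hOK l.length l le_rfl]
    rw [ih (T₁ ++ [(q, r)]) hg']
    simp

def pvPairOKb (q : List Char) (pr : List Char × List Char) : Bool :=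
  pr.2.tails.all (fun s => s.isEmpty || (!(q.isPrefixOf s) && !(s.isPrefixOf q))) &&
  q.tails.all (fun s => s.isEmpty || (!(pr.1.isPrefixOf s) && !(s.isPrefixOf pr.1))) &&
  q.tails.all (fun v => v.isEmpty || (!(v.isPrefixOf pr.2) && !(pr.2.isPrefixOf v)))

theorem pvOK_of_b (T : List (List Char × List Char)) (q : List Char)
    (h : T.all (pvPairOKb q) = true) : pvOK T q := by
  intro pr hm
  have hp := List.all_eq_true.mp h pr hm
  simp only [pvPairOKb, Bool.and_eq_true, List.all_eq_true] at hp
  obtain ⟨⟨h1, h2⟩, h3⟩ := hp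
  refine ⟨fun s hs hne => ?_, fun s hs hne => ?_, fun v hv hne => ?_⟩
  · have := h1 s hs
    simp only [Bool.or_eq_true, Bool.and_eq_true, Bool.not_eq_true', List.isEmpty_iff] at this
    rcases this with h' | ⟨ha, hb⟩
    · exact absurd h' hne
    · exact ⟨fun hc => by simp [List.isPrefixOf_iff_prefix.mpr hc] at ha,
             fun hc => by simp [List.isPrefixOf_iff_prefix.mpr hc] at hb⟩
  · have := h2 s hs
    simp only [Bool.or_eq_true, Bool.and_eq_true, Bool.not_eq_true', List.isEmpty_iff] at this
    rcases this with h' | ⟨ha, hb⟩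
    · exact absurd h' hne
    · exact ⟨fun hc => by simp [List.isPrefixOf_iff_prefix.mpr hc] at ha,
             fun hc => by simp [List.isPrefixOf_iff_prefix.mpr hc] at hb⟩
  · have := h3 v hv
    simp only [Bool.or_eq_true, Bool.and_eq_true, Bool.not_eq_true', List.isEmpty_iff] at this
    rcases this with h' | ⟨ha, hb⟩
    · exact absurd h' hne
    · exact ⟨fun hc => by simp [List.isPrefixOf_iff_prefix.mpr hc] at ha,
             fun hc => by simp [List.isPrefixOf_iff_prefix.mpr hc] at hb⟩

def pvGoodb : List (List Char × List Char) → List (List Char × List Char) → Bool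
  | _, [] => true
  | T₁, (q, r) :: T₂ => !q.isEmpty && T₁.all (pvPairOKb q) && pvGoodb (T₁ ++ [(q, r)]) T₂

theorem pvGood_of_b : ∀ T₂ T₁, pvGoodb T₁ T₂ = true → pvGood T₁ T₂ := by
  intro T₂
  induction T₂ with
  | nil => intro _ _; trivial
  | cons hd T₂ ih =>
    obtain ⟨q, r⟩ := hd
    intro T₁ h
    simp only [pvGoodb, Bool.and_eq_true, Bool.not_eq_true', List.isEmpty_eq_false_iff] at h
    exact ⟨h.1.1, pvOK_of_b _ _ h.1.2, ih _ h.2⟩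

theorem pvGood_table : pvGood [] pvTable :=
  pvGood_of_b _ _ (by decide)

theorem pvRepStep (h o n : String) (ho : o.toList ≠ []) :
    PySem.Str.replace h o n = String.ofList (pvRep1 o.toList n.toList h.toList) := by
  unfold PySem.Str.replace
  exact congrArg String.ofList (pvReplace_eq _ _ _ ho)

theorem pvFold_eq (ps : List String) :
    ∀ (h : String),
      ps.foldl (fun h p =>
        let rota : String := if p = "index" then "/" else "/" ++ p
        PySem.Str.replace h ("href=\"" ++ p ++ ".html\"") ("href=\"" ++ rota ++ "\"")) h
      = String.ofList (pvChain (ps.map (fun p =>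
          (("href=\"" ++ p ++ ".html\"").toList,
           ("href=\"" ++ (if p = "index" then "/" else "/" ++ p) ++ "\"").toList))) h.toList) := by
  induction ps with
  | nil => intro h; simp [pvChain, String.ofList_toList]
  | cons p ps ih =>
    intro h
    simp only [List.foldl, List.map, pvChain]
    rw [pvRepStep h _ _ (by simp [String.toList_append])]
    have ih' := ih (String.ofList (pvRep1 ("href=\"" ++ p ++ ".html\"").toList
      ("href=\"" ++ (if p = "index" then "/" else "/" ++ p) ++ "\"").toList h.toList))
    simp only [String.toList_ofList] at ih'
    exact ih'

-- ===== VERDICT (by name: the statement is the Claim_ definition above) =====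
theorem limpar_links_spec : Claim_equal_limpar_links := by
  intro html _
  unfold Spec_limpar_links limpar_links limpar_links_alt
  rw [pvFold_eq]
  have h1 : pvChain pvTable html.toList = pvScan pvTable html.toList := by
    have := pvChain_eq_scan html.toList pvTable [] pvGood_table
    simpa [pvScan_nil] using this
  exact congrArg String.ofList h1
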